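-- pv_equiv track=rewrite | github.com/friaes/FP | Projeto1/Projeto1_Rodrigo_Friaes.py | filtrar_bdb
-- ===== SOURCE A (Python) =====
-- def eh_entrada(entrada_bdb):
--     if not(type(entrada_bdb) == tuple and len(entrada_bdb) == 3 and type(entrada_bdb[0]) == str
--        and type(entrada_bdb[1]) == str and type(entrada_bdb[2]) == tuple and len(entrada_bdb[2]) > 1):
--         return False
--     for a in entrada_bdb[0]:
--         if not('a' <= a <= 'z' or a == '-'):
--             return False
--     for b in entrada_bdb[1][1:-1]:
--         if not('a' <= b <= 'z' and entrada_bdb[1][0] == '[' and entrada_bdb[1][-1] == ']'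
--            and len(entrada_bdb[1][1:-1]) == 5):
--             return False
--     for c in entrada_bdb[2]:
--         if not (type(c) == int and c > 0):
--             return False
--     return True
--
-- def validar_cifra(s1, s2):
--     ocorrencias = {}
--     ctrl = ''              # sequencia de controlo
--     for i in s1:           # contar numero de ocorrências de cada caracter excluindo '-'
--         if i != '-' and i not in ocorrencias:
--             ocorrencias[i] = 1
--         elif i in ocorrencias:
--             ocorrencias[i] += 1
--     for j in ocorrencias:  # comparar n.º de ocorrências entre caracteres da cifra
--         k = 0              # caracter da sequencia de controlo
--         while k < len(ocorrencias):
--             if len(ctrl) == 0:        # se nenhum caracter da cifra tiver sido adicionado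
--                 ctrl = j
--                 k = len(ocorrencias)  # avança para o próximo caracter da cifra
--             elif k == len(ctrl):      # se o caracter já tiver sido comparado com todos os caracteres
--                 ctrl += j             # da sequencia de controlo, este é o que tem menor n.º de ocorrencias
--                 k = len(ocorrencias)
--             elif ocorrencias[j] > ocorrencias[ctrl[k]]:   # se tiver mais ocorrencias que k é adicionado antes de k
--                 ctrl = ctrl[:k] + j + ctrl[k:]
--                 k = len(ocorrencias)
--             elif ocorrencias[j] == ocorrencias[ctrl[k]]:  # mesmo n.º de ocorrencias
--                 if j > ctrl[k]:                           # se não estiverem por ordem alfabética: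
--                     k += 1                                # avança para o próximo caracter da sequencia de controlo.
--                 else:
--                     ctrl = ctrl[:k] + j + ctrl[k:]        # se estiver por ordem alfabética o caracter é
--                     k = len(ocorrencias)                  # adicionado antes de k
--             elif ocorrencias[j] < ocorrencias[ctrl[k]]:   # se tiver menos ocorrencias que k
--                 k += 1                                    # avança para o próximo k
--     controlo = '[' + ctrl[:5] + ']'
--     if controlo == s2:
--         return True
--     return False
--
-- def filtrar_bdb(lista_bdb):
--     entradas_invalidas = []
--     if not (type(lista_bdb) == list and len(lista_bdb) > 0):
--         raise ValueError('filtrar_bdb: argumento invalido')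
--     for entrada in lista_bdb:
--         if not eh_entrada(entrada):
--             raise ValueError('filtrar_bdb: argumento invalido')
--         if not validar_cifra(entrada[0], entrada[1]):
--             entradas_invalidas += [entrada]
--     return entradas_invalidas
-- ===== SOURCE B (Python) =====
-- def eh_entrada(entrada_bdb):
--     if not(type(entrada_bdb) == tuple and len(entrada_bdb) == 3 and type(entrada_bdb[0]) == str
--        and type(entrada_bdb[1]) == str and type(entrada_bdb[2]) == tuple and len(entrada_bdb[2]) > 1):
--         return False
--     for a in entrada_bdb[0]:
--         if not('a' <= a <= 'z' or a == '-'):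
--             return False
--     for b in entrada_bdb[1][1:-1]:
--         if not('a' <= b <= 'z' and entrada_bdb[1][0] == '[' and entrada_bdb[1][-1] == ']'
--            and len(entrada_bdb[1][1:-1]) == 5):
--             return False
--     for c in entrada_bdb[2]:
--         if not (type(c) == int and c > 0):
--             return False
--     return True
--
-- def validar_cifra(s1, s2):
--     counts = {}
--     for ch in s1:
--         if ch != '-':
--             counts[ch] = counts.get(ch, 0) + 1
--     ctrl = ''.join(sorted(counts, key=lambda c: (-counts[c], c)))[:5]
--     return '[' + ctrl + ']' == s2
--
-- def filtrar_bdb(lista_bdb):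
--     if not (type(lista_bdb) == list and len(lista_bdb) > 0):
--         raise ValueError('filtrar_bdb: argumento invalido')
--     for entrada in lista_bdb:
--         if not eh_entrada(entrada):
--             raise ValueError('filtrar_bdb: argumento invalido')
--     return [e for e in lista_bdb if not validar_cifra(e[0], e[1])]
-- ===== Notes on version B (the rewrite author's own statement) =====
-- stated objective: idiomatic
-- what changed: validar_cifra's hand-written insertion-sort-into-a-string over the dict keys is replaced by building the count dict in one pass and sorting the keys once with sorted(key=(-count, char)) then slicing to 5; filtrar_bdb validates first and then filters with a comprehension instead of interleaving both in one loop.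
import Mathlib
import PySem

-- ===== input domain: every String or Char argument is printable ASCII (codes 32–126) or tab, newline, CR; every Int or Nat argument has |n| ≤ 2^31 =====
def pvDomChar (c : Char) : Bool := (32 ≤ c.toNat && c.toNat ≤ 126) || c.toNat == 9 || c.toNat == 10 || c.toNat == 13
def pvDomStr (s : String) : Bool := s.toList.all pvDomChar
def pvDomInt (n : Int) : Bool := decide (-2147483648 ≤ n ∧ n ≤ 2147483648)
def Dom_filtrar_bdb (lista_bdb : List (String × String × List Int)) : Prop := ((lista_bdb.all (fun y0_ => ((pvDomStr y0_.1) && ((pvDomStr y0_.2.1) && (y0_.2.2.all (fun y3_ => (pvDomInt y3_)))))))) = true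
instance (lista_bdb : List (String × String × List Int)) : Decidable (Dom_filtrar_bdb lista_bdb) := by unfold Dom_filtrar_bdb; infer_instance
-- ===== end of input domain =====

-- B replaces A's hand-written insertion sort of the cipher characters (repeated string splicing
-- driven by an index-walking while loop) by one library sort of the count-dict's keys under the
-- key (-count, char) sliced to 5, and filtrar_bdb by a validation pass followed by a filter.

-- ===== PORT A =====
-- shared helper (Source B keeps it verbatim): the Python runtime type checks are true by the Lean
-- types; each early-return-False 'for' loop is ported as List.all over the same elements
def eh_entrada (e : String × String × List Int) : Bool :=
  decide (1 < e.2.2.length) &&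
  e.1.toList.all (fun a => (decide ('a' ≤ a) && decide (a ≤ 'z')) || a == '-') &&
  (PySem.List.slice e.2.1.toList (some 1) (some (-1))).all (fun b =>
    decide ('a' ≤ b) && decide (b ≤ 'z') &&
    (PySem.List.pyGet? e.2.1.toList 0 == some '[') &&
    (PySem.List.pyGet? e.2.1.toList (-1) == some ']') &&
    decide ((PySem.List.slice e.2.1.toList (some 1) (some (-1))).length = 5)) &&
  e.2.2.all (fun c => decide (0 < c))

-- A's first loop of validar_cifra: count occurrences of every character except '-'
def ocorrencias_of (s1 : List Char) : PySem.Dict Char Int :=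
  s1.foldl (fun d i =>
    if i != '-' && !(d.contains i) then d.insert i 1
    else if d.contains i then d.modify i 0 (· + 1)
    else d) PySem.Dict.empty

-- A's inner while loop: walk ctrl from index k and splice j in; Python's ocorrencias[j] /
-- ocorrencias[ctrl[k]] cannot raise (both are keys), ported as getD 0; ctrl[k] is read only
-- when k < len(ctrl), ported as getD ' '
def cifra_insere (occ : PySem.Dict Char Int) (j : Char) (ctrl : List Char) (k : Nat) : List Char :=
  if _h : k < occ.size then
    if ctrl.length = 0 then [j]
    else if k = ctrl.length then ctrl ++ [j]
    else if occ.getD j 0 > occ.getD (ctrl.getD k ' ') 0 then ctrl.take k ++ [j] ++ ctrl.drop k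
    else if occ.getD j 0 = occ.getD (ctrl.getD k ' ') 0 then
      if ctrl.getD k ' ' < j then cifra_insere occ j ctrl (k + 1)
      else ctrl.take k ++ [j] ++ ctrl.drop k
    else cifra_insere occ j ctrl (k + 1)
  else ctrl
termination_by occ.size - k

def validar_cifra (s1 s2 : String) : Bool :=
  let occ := ocorrencias_of s1.toList
  let ctrl := occ.keys.foldl (fun ctrl j => cifra_insere occ j ctrl 0) []
  ('[' :: (ctrl.take 5 ++ [']'])) == s2.toList

def filtrar_bdb (lista_bdb : List (String × String × List Int)) : List (String × String × List Int) :=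
  -- the two 'raise ValueError' paths (empty list / an entrada failing eh_entrada) are excluded by
  -- Pre_filtrar_bdb; on them the port skips the entrada instead of raising
  lista_bdb.foldl (fun acc entrada =>
    if !eh_entrada entrada then acc
    else if !validar_cifra entrada.1 entrada.2.1 then acc ++ [entrada]
    else acc) []

-- ===== PORT B =====
-- B's count loop: counts[ch] = counts.get(ch, 0) + 1 for ch != '-'
def contagens_of (s1 : List Char) : PySem.Dict Char Int :=
  s1.foldl (fun d ch => if ch != '-' then d.insert ch (d.getD ch 0 + 1) else d) PySem.Dict.empty

def validar_cifra_alt (s1 s2 : String) : Bool :=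
  let counts := contagens_of s1.toList
  let ctrl := (PySem.List.sorted2 counts.keys (fun c => -(counts.getD c 0)) (fun c => c)).take 5
  ('[' :: (ctrl ++ [']'])) == s2.toList

def filtrar_bdb_alt (lista_bdb : List (String × String × List Int)) : List (String × String × List Int) :=
  -- Source B raises ValueError on an empty list or an invalid entrada: excluded by Pre_filtrar_bdb
  if lista_bdb.all (fun e => eh_entrada e) then
    lista_bdb.filter (fun e => !validar_cifra_alt e.1 e.2.1)
  else []

-- ===== PRECONDITION & SPEC =====
-- closed-form shape of one acceptable entrada: >1 positive ints, name of lowercase letters and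
-- '-', and a cipher string that is either shorter than 3 characters or exactly '[' + 5 lowercase
-- letters + ']'
def entradaOK (e : String × String × List Int) : Bool :=
  decide (1 < e.2.2.length) &&
  e.1.toList.all (fun a => (decide ('a' ≤ a) && decide (a ≤ 'z')) || a == '-') &&
  (decide (e.2.1.toList.length ≤ 2) ||
    (decide (e.2.1.toList.length = 7) && (e.2.1.toList.head? == some '[') &&
     (e.2.1.toList.getLast? == some ']') &&
     ((e.2.1.toList.drop 1).take 5).all (fun b => decide ('a' ≤ b) && decide (b ≤ 'z')))) &&
  e.2.2.all (fun c => decide (0 < c))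

-- Pre_ excludes exactly the inputs on which the Python raises ValueError: the empty list and any
-- list containing an entrada rejected by eh_entrada
def Pre_filtrar_bdb (lista_bdb : List (String × String × List Int)) : Prop :=
  lista_bdb ≠ [] ∧ lista_bdb.all entradaOK = true
instance (lista_bdb : List (String × String × List Int)) : Decidable (Pre_filtrar_bdb lista_bdb) := by unfold Pre_filtrar_bdb; infer_instance

def pvWitness_filtrar_bdb : (List (String × String × List Int)) := [("ab", "[abcde]", [1, 2])]

def Spec_filtrar_bdb (lista_bdb : List (String × String × List Int)) (out : List (String × String × List Int)) : Prop := out = filtrar_bdb_alt lista_bdb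
instance (lista_bdb : List (String × String × List Int)) (out : List (String × String × List Int)) : Decidable (Spec_filtrar_bdb lista_bdb out) := by unfold Spec_filtrar_bdb; infer_instance

-- ===== CLAIM (what is proved, stated in full; the proofs are below) =====
def Claim_equal_filtrar_bdb : Prop := ∀ (lista_bdb : List (String × String × List Int)), Dom_filtrar_bdb lista_bdb → Pre_filtrar_bdb lista_bdb → Spec_filtrar_bdb lista_bdb (filtrar_bdb lista_bdb)

-- ===== LEMMAS AND PROOFS =====

-- the lexicographic key A's insertion loop orders ctrl by
def cifraKey (occ : PySem.Dict Char Int) (c : Char) : Lex (Int × Char) := toLex (-(occ.getD c 0), c)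

-- the two count loops build the same dict (neither ever stores '-')
theorem dict_fold_eq (l : List Char) (d : PySem.Dict Char Int) (h : d.contains '-' = false) :
    l.foldl (fun d i =>
      if i != '-' && !(d.contains i) then d.insert i 1
      else if d.contains i then d.modify i 0 (· + 1)
      else d) d =
    l.foldl (fun d ch => if ch != '-' then d.insert ch (d.getD ch 0 + 1) else d) d := by
  induction l generalizing d with
  | nil => rfl
  | cons i l ih =>
    have hstep : (if i != '-' && !(d.contains i) then d.insert i 1
        else if d.contains i then d.modify i 0 (· + 1) else d) =
        (if i != '-' then d.insert i (d.getD i 0 + 1) else d) := by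
      by_cases hi : i = '-'
      · subst hi; simp [h]
      · by_cases hc : d.contains i = true
        · simp only [hc, Bool.not_true, Bool.and_false, Bool.false_eq_true, if_false, if_pos hc,
            if_pos (by simp [hi] : (i != '-') = true)]
          rfl
        · have hcf : d.contains i = false := by simpa using hc
          simp [hi, hcf, PySem.Dict.getD_of_not_contains d (0:Int) hcf]
    have hpres : (if i != '-' then d.insert i (d.getD i 0 + 1) else d).contains '-' = false := by
      by_cases hi : i = '-'
      · subst hi; simpa using h
      · rw [if_pos (by simp [hi])]
        rw [PySem.Dict.contains_insert]
        simp [h, Ne.symm hi]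
    rw [List.foldl_cons, List.foldl_cons, hstep]
    exact ih _ hpres

theorem ocorrencias_eq_contagens (l : List Char) : ocorrencias_of l = contagens_of l :=
  dict_fold_eq l PySem.Dict.empty (by simp [PySem.Dict.contains_empty])

theorem contagens_nodup_keys (l : List Char) : (contagens_of l).keys.Nodup := by
  unfold contagens_of
  rw [PySem.List.foldl_if_eq_foldl_filter]
  exact PySem.Dict.nodup_keys_foldl_insert _ _ _ (by simp [PySem.Dict.keys_empty])

theorem insertBy_cons {α : Type} (before : α → α → Bool) (x y : α) (ys : List α) :
    PySem.List.insertBy before x (y :: ys) =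
      if before x y then x :: y :: ys else y :: PySem.List.insertBy before x ys := rfl

theorem length_insertBy {α : Type} (before : α → α → Bool) (x : α) (ys : List α) :
    (PySem.List.insertBy before x ys).length = ys.length + 1 := by
  induction ys with
  | nil => rfl
  | cons y ys ih => rw [insertBy_cons]; split <;> simp [ih]

-- A's index-walking splice from position k is insertBy under the key (-count, char)
theorem cifra_insere_eq (occ : PySem.Dict Char Int) (j : Char) :
    ∀ (n : Nat) (ctrl : List Char) (k : Nat), ctrl.length - k = n → k ≤ ctrl.length →
    ctrl.length < occ.size → j ∉ ctrl →
    cifra_insere occ j ctrl k =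
      ctrl.take k ++
        PySem.List.insertBy (fun a b => decide (cifraKey occ a < cifraKey occ b)) j
          (ctrl.drop k) := by
  intro n
  induction n with
  | zero =>
    intro ctrl k hn hk hlen hj
    have hk' : k = ctrl.length := by omega
    subst hk'
    rw [cifra_insere, dif_pos (by omega)]
    by_cases h0 : ctrl.length = 0
    · have : ctrl = [] := List.eq_nil_of_length_eq_zero h0
      subst this
      simp [PySem.List.insertBy]
    · rw [if_neg h0, if_pos rfl]
      simp [PySem.List.insertBy]
  | succ n ih =>
    intro ctrl k hn hk hlen hj
    have hklt : k < ctrl.length := by omega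
    have hck : ctrl.getD k ' ' = ctrl[k] := List.getD_eq_getElem ctrl ' ' hklt
    have hdrop : ctrl.drop k = ctrl[k] :: ctrl.drop (k + 1) := List.drop_eq_getElem_cons hklt
    have hjk : j ≠ ctrl[k] := by
      intro h; exact hj (h ▸ List.getElem_mem hklt)
    have htake : ctrl.take (k + 1) = ctrl.take k ++ [ctrl[k]] := by
      rw [List.take_succ]; simp [List.getElem?_eq_getElem hklt]
    rw [cifra_insere, dif_pos (by omega), if_neg (by omega), if_neg (by omega), hck, hdrop,
      insertBy_cons]
    by_cases hgt : occ.getD j 0 > occ.getD ctrl[k] 0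
    · rw [if_pos hgt]
      have hb : (decide (cifraKey occ j < cifraKey occ ctrl[k])) = true := by
        simp only [cifraKey, decide_eq_true_eq, Prod.Lex.toLex_lt_toLex]
        left; omega
      rw [hb, if_pos rfl, ← hdrop]
      simp
    · rw [if_neg hgt]
      by_cases heq : occ.getD j 0 = occ.getD ctrl[k] 0
      · rw [if_pos heq]
        by_cases hlt : ctrl[k] < j
        · rw [if_pos hlt]
          have hb : (decide (cifraKey occ j < cifraKey occ ctrl[k])) = false := by
            simp only [cifraKey, decide_eq_false_iff_not, Prod.Lex.toLex_lt_toLex]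
            push_neg
            refine ⟨by omega, fun _ => le_of_lt hlt⟩
          rw [hb, if_neg (by simp)]
          rw [ih ctrl (k + 1) (by omega) (by omega) hlen hj, htake, List.append_assoc]
          rfl
        · rw [if_neg hlt]
          have hb : (decide (cifraKey occ j < cifraKey occ ctrl[k])) = true := by
            simp only [cifraKey, decide_eq_true_eq, Prod.Lex.toLex_lt_toLex]
            right
            exact ⟨by omega, lt_of_le_of_ne (not_lt.1 hlt) hjk⟩
          rw [hb, if_pos rfl, ← hdrop]
          simp
      · rw [if_neg heq]
        have hb : (decide (cifraKey occ j < cifraKey occ ctrl[k])) = false := by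
          simp only [cifraKey, decide_eq_false_iff_not, Prod.Lex.toLex_lt_toLex]
          push_neg
          refine ⟨by omega, fun h => absurd (by omega : occ.getD j 0 = occ.getD ctrl[k] 0) heq⟩
        rw [hb, if_neg (by simp)]
        rw [ih ctrl (k + 1) (by omega) (by omega) hlen hj, htake, List.append_assoc]
        rfl

-- the whole ctrl-building loop is the insertion-sort fold of sorted under cifraKey
theorem fold_insere (occ : PySem.Dict Char Int) :
    ∀ (l acc : List Char), acc.length + l.length ≤ occ.size → l.Nodup →
    (∀ x ∈ l, x ∉ acc) →
    l.foldl (fun c j => cifra_insere occ j c 0) acc =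
    l.foldl (fun c j =>
      PySem.List.insertBy (fun a b => decide (cifraKey occ a < cifraKey occ b)) j c) acc := by
  intro l
  induction l with
  | nil => intro acc _ _ _; rfl
  | cons j l ih =>
    intro acc hsz hnd hnotin
    simp only [List.foldl_cons]
    have hstep : cifra_insere occ j acc 0 =
        PySem.List.insertBy (fun a b => decide (cifraKey occ a < cifraKey occ b)) j acc := by
      have := cifra_insere_eq occ j acc.length acc 0 (by omega) (by omega)
        (by simp at hsz; omega) (hnotin j (by simp))
      simpa using this
    rw [hstep]
    obtain ⟨hjl, hnd'⟩ := List.nodup_cons.1 hnd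
    apply ih
    · rw [length_insertBy]; simp only [List.length_cons] at hsz; omega
    · exact hnd'
    · intro x hx
      rw [PySem.List.mem_insertBy]
      push_neg
      exact ⟨fun hxj => hjl (hxj ▸ hx), hnotin x (List.mem_cons_of_mem j hx)⟩

theorem keys_length_eq_size (occ : PySem.Dict Char Int) : occ.keys.length = occ.size := by
  simp [PySem.Dict.keys, PySem.Dict.size]

theorem ctrl_eq_sorted (occ : PySem.Dict Char Int) (hnd : occ.keys.Nodup) :
    occ.keys.foldl (fun ctrl j => cifra_insere occ j ctrl 0) [] =
      PySem.List.sorted occ.keys (cifraKey occ) := by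
  rw [PySem.List.sorted_eq_foldl_insertBy]
  exact fold_insere occ occ.keys []
    (by rw [keys_length_eq_size]; simp) hnd (by simp)

theorem sorted2_eq_sorted {α : Type} (xs : List α) (k1 : α → Int) (k2 : α → Char) :
    PySem.List.sorted2 xs k1 k2 =
      PySem.List.sorted xs (fun a => toLex (k1 a, k2 a)) := by
  have hbefore : (fun a b => decide (k1 a < k1 b) || (!decide (k1 b < k1 a) && decide (k2 a < k2 b)))
      = (fun a b => decide ((fun a => toLex (k1 a, k2 a)) a < (fun a => toLex (k1 a, k2 a)) b)) := by
    funext a b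
    by_cases h1 : k1 a < k1 b
    · simp [h1, Prod.Lex.toLex_lt_toLex]
    · by_cases h2 : k1 b < k1 a
      · simp only [Prod.Lex.toLex_lt_toLex]
        simp [h1, h2]
        omega
      · have he : k1 a = k1 b := le_antisymm (not_lt.1 h2) (not_lt.1 h1)
        simp [he, Prod.Lex.toLex_lt_toLex]
  simp only [PySem.List.sorted2, PySem.List.sorted, Bool.false_eq_true, if_false]
  rw [hbefore]

theorem validar_cifra_eq (s1 s2 : String) : validar_cifra s1 s2 = validar_cifra_alt s1 s2 := by
  simp only [validar_cifra, validar_cifra_alt]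
  rw [ocorrencias_eq_contagens]
  rw [ctrl_eq_sorted (contagens_of s1.toList) (contagens_nodup_keys s1.toList)]
  rw [sorted2_eq_sorted]
  rfl

theorem slice_one_neg_one {α : Type} (xs : List α) :
    PySem.List.slice xs (some 1) (some (-1)) = (xs.drop 1).take (xs.length - 2) := by
  rcases xs with _ | ⟨x, t⟩
  · rfl
  · simp only [PySem.List.slice, PySem.List.clampIdx]
    norm_num
    rw [if_neg (by omega : ¬ ((t.length : Int) < 0))]
    omega

theorem entradaOK_eh (e : String × String × List Int) (h : entradaOK e = true) :
    eh_entrada e = true := by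
  simp only [entradaOK, Bool.and_eq_true, Bool.or_eq_true, decide_eq_true_eq, List.all_eq_true,
    beq_iff_eq] at h
  obtain ⟨⟨⟨hlen2, hname⟩, hcif⟩, hints⟩ := h
  simp only [eh_entrada, Bool.and_eq_true, Bool.or_eq_true, decide_eq_true_eq, List.all_eq_true,
    beq_iff_eq]
  refine ⟨⟨⟨hlen2, fun a ha => ?_⟩, ?_⟩, hints⟩
  · rcases hname a ha with ⟨h1, h2⟩ | h3
    · exact Or.inl ⟨h1, h2⟩
    · exact Or.inr h3
  intro b hb
  rw [slice_one_neg_one] at hb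
  rcases hcif with hle2 | ⟨⟨⟨h7, hhd⟩, hlast⟩, hmid⟩
  · have h0 : e.2.1.toList.length - 2 = 0 := by omega
    rw [h0] at hb
    simp at hb
  · have hb' : b ∈ (e.2.1.toList.drop 1).take 5 := by rw [h7] at hb; exact hb
    obtain ⟨hb1, hb2⟩ := hmid b hb'
    refine ⟨⟨⟨⟨hb1, hb2⟩, ?_⟩, ?_⟩, ?_⟩
    · rw [PySem.List.pyGet?_zero, ← List.head?_eq_getElem?]
      exact hhd
    · rw [PySem.List.pyGet?_neg_one]
      exact hlast
    · rw [slice_one_neg_one, List.length_take, List.length_drop, h7]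
      norm_num

-- ===== VERDICT (by name: the statement is the Claim_ definition above) =====
theorem filtrar_bdb_spec : Claim_equal_filtrar_bdb := by
  intro lista hdom hpre
  unfold Spec_filtrar_bdb filtrar_bdb filtrar_bdb_alt
  obtain ⟨hne, hall⟩ := hpre
  have hvalid : ∀ e ∈ lista, eh_entrada e = true := by
    intro e he
    exact entradaOK_eh e (List.all_eq_true.1 hall e he)
  rw [if_pos (List.all_eq_true.2 hvalid)]
  rw [PySem.List.foldl_congr_mem lista _
    (fun acc e => if !validar_cifra_alt e.1 e.2.1 then acc ++ [e] else acc) []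
    (by intro acc e he
        rw [hvalid e he]
        simp [validar_cifra_eq])]
  rw [PySem.List.foldl_append_if_eq_filter]
  simp
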